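-- pv_equiv track=rewrite | github.com/Daerdemandt/Learning-bioinformatics | SCSP/Solution.py | get_insertions
-- ===== SOURCE A (Python) =====
-- def get_sub_indices(string, sub):
-- 	if len(sub) == 0:
-- 		return []
-- 	for i in range(len(string)):
-- 		if string[i] == sub[0]:
-- 			indices = get_sub_indices(string[i+1:], sub[1:])
-- 			return [i] + [num + i + 1 for num in indices]
-- 	assert True == False
--
-- def get_insertions(string, sub):
-- 	result = []
-- 	start = 0
-- 	for end in get_sub_indices(string, sub):
-- 		result += [string[start:end]]
-- 		start = end + 1
-- 	result += [string[start:]]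
-- 	return result
-- ===== SOURCE B (Python) =====
-- def get_insertions(string, sub):
--     # Single linear two-pointer pass: advance through string once, matching sub greedily
--     # and collecting the chars between matches as pieces.
--     result = []
--     piece = []
--     j = 0
--     for ch in string:
--         if j < len(sub) and ch == sub[j]:
--             result.append(''.join(piece))
--             piece = []
--             j += 1
--         else:
--             piece.append(ch)
--     result.append(''.join(piece))
--     return result
-- ===== Notes on version B (the rewrite author's own statement) =====
-- stated objective: faster
-- what changed: Replaced the recursive first-occurrence search with O(n*m) slice copies plus an index-based re-slicing loop by one linear two-pointer pass over the string that matches sub greedily and emits the pieces directly.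
import Mathlib
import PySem

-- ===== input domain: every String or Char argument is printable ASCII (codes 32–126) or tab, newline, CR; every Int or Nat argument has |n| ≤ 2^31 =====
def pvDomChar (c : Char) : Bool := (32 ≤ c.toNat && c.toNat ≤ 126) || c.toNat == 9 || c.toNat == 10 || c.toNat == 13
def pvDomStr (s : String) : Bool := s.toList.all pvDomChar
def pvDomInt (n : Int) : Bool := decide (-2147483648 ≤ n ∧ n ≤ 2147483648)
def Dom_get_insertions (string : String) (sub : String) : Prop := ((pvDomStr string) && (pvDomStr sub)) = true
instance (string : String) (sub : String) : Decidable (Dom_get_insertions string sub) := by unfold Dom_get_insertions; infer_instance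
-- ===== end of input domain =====

-- B replaces A's recursive slice-copying index search + re-slicing loop by one linear
-- two-pointer pass (objective: faster; asymptotic, O(n*m) -> O(n+m)).

-- ===== PORT A =====
-- inner 'for i in range(len(string))' loop of get_sub_indices: scan for sub[0];
-- recfn is the recursive call on (string[i+1:], sub[1:]); none = the failing assert.
def gsiScan (c : Char) (recfn : List Char → Option (List Int)) :
    List Char → Int → Option (List Int)
  | [], _ => none
  | x :: xs, i =>
    if x == c then
      match recfn xs with
      | none => none
      | some indices => some (i :: indices.map (fun num => num + i + 1))
    else gsiScan c recfn xs (i + 1)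

-- get_sub_indices; recursion is on sub (sub[1:] each call)
def gsiA (s : List Char) (sub : List Char) : Option (List Int) :=
  match sub with
  | [] => some []
  | c :: rest => gsiScan c (fun t => gsiA t rest) s 0

def get_insertions (string : String) (sub : String) : List String :=
  let s := string.toList
  match gsiA s sub.toList with
  | none => []   -- unreachable under Pre_: the Python raises AssertionError here
  | some idxs =>
    let p := idxs.foldl
      (fun (acc : List String × Int) e =>
        (acc.1 ++ [String.mk (PySem.List.slice s (some acc.2) (some e))], e + 1))
      ([], 0)
    p.1 ++ [String.mk (PySem.List.slice s (some p.2) none)]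

-- ===== PORT B =====
-- one pass over string; the remaining-sub list plays the role of Source B's pointer j
-- (sub consumed from the front ↔ j incremented), piece is accumulated reversed.
def altGo : List Char → List Char → List Char → List String
  | [], _, piece => [String.mk piece.reverse]
  | ch :: s, sub, piece =>
    match sub with
    | c :: rest =>
      if ch == c then String.mk piece.reverse :: altGo s rest []
      else altGo s (c :: rest) (ch :: piece)
    | [] => altGo s [] (ch :: piece)

def get_insertions_alt (string : String) (sub : String) : List String :=
  altGo string.toList sub.toList []

-- ===== PRECONDITION & SPEC =====
-- Pre_ excludes exactly the inputs on which A raises AssertionError: sub not a subsequence of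
-- string (A returns on every other input; B returns everywhere).
def Pre_get_insertions (string : String) (sub : String) : Prop :=
  sub.toList.Sublist string.toList
instance (string : String) (sub : String) : Decidable (Pre_get_insertions string sub) := by
  unfold Pre_get_insertions; infer_instance

def pvWitness_get_insertions : String × String := ("abcab", "bb")

def Spec_get_insertions (string : String) (sub : String) (out : List String) : Prop :=
  out = get_insertions_alt string sub
instance (string : String) (sub : String) (out : List String) : Decidable (Spec_get_insertions string sub out) := by unfold Spec_get_insertions; infer_instance

-- ===== CLAIM (what is proved, stated in full; the proofs are below) =====
def Claim_equal_get_insertions : Prop := ∀ (string : String) (sub : String), Dom_get_insertions string sub → Pre_get_insertions string sub → Spec_get_insertions string sub (get_insertions string sub)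

-- ===== LEMMAS AND PROOFS =====

-- pieces of A's result, written recursively (what the foldl computes)
def Afold (s : List Char) (st : Int) : List Int → List String
  | [] => [String.mk (PySem.List.slice s (some st) none)]
  | e :: js => String.mk (PySem.List.slice s (some st) (some e)) :: Afold s (e + 1) js

theorem foldl_to_Afold (s : List Char) (js : List Int) :
    ∀ (res : List String) (st : Int),
      (js.foldl
        (fun (acc : List String × Int) e =>
          (acc.1 ++ [String.mk (PySem.List.slice s (some acc.2) (some e))], e + 1))
        (res, st)).1
        ++ [String.mk (PySem.List.slice s
              (some (js.foldl
                (fun (acc : List String × Int) e =>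
                  (acc.1 ++ [String.mk (PySem.List.slice s (some acc.2) (some e))], e + 1))
                (res, st)).2) none)]
      = res ++ Afold s st js := by
  induction js with
  | nil => intro res st; simp [Afold]
  | cons e js ih =>
      intro res st
      simp only [List.foldl_cons, Afold]
      rw [ih]
      simp

theorem first_split {c : Char} {s : List Char} (h : c ∈ s) :
    ∃ pre post, s = pre ++ c :: post ∧ c ∉ pre := by
  induction s with
  | nil => cases h
  | cons x xs ih =>
      by_cases hx : x = c
      · exact ⟨[], xs, by rw [hx]; rfl, List.not_mem_nil⟩
      · have hm : c ∈ xs := by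
          rcases List.mem_cons.mp h with h1 | h1
          · exact absurd h1.symm hx
          · exact h1
        rcases ih hm with ⟨pre, post, hs, hc⟩
        refine ⟨x :: pre, post, by simp [hs], ?_⟩
        simp only [List.mem_cons, not_or]
        exact ⟨fun h => hx h.symm, hc⟩

theorem sublist_after_first {c : Char} {rest : List Char} :
    ∀ (pre : List Char) {post : List Char},
      (c :: rest).Sublist (pre ++ c :: post) → c ∉ pre → rest.Sublist post := by
  intro pre
  induction pre with
  | nil => intro post h _; simpa using h
  | cons p pre ih =>
      intro post h hc
      simp only [List.mem_cons, not_or] at hc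
      simp only [List.cons_append] at h
      cases h with
      | cons _ h' => exact ih h' hc.2
      | cons₂ _ h' => exact absurd rfl hc.1

theorem gsiScan_spec (c : Char) (recfn : List Char → Option (List Int)) :
    ∀ (pre post : List Char) (i0 : Int), c ∉ pre →
      gsiScan c recfn (pre ++ c :: post) i0 =
        match recfn post with
        | none => none
        | some idxs =>
            some ((i0 + pre.length) :: idxs.map (fun num => num + (i0 + pre.length) + 1)) := by
  intro pre
  induction pre with
  | nil =>
      intro post i0 _
      simp [gsiScan]
  | cons p pre ih =>
      intro post i0 hc
      simp only [List.mem_cons, not_or] at hc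
      have hp : (p == c) = false := beq_false_of_ne (fun h => hc.1 h.symm)
      simp only [List.cons_append, gsiScan, hp, Bool.false_eq_true, if_false]
      rw [ih post (i0 + 1) hc.2]
      have : i0 + 1 + (pre.length : Int) = i0 + ((p :: pre).length : Int) := by
        simp; ring
      rw [this]

theorem altGo_nil_sub : ∀ (s piece : List Char),
    altGo s [] piece = [String.mk (piece.reverse ++ s)] := by
  intro s
  induction s with
  | nil => intro piece; simp [altGo]
  | cons x xs ih => intro piece; simp [altGo, ih]

theorem altGo_split {c : Char} (rest : List Char) :
    ∀ (pre : List Char) (post piece : List Char), c ∉ pre →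
      altGo (pre ++ c :: post) (c :: rest) piece =
        String.mk (piece.reverse ++ pre) :: altGo post rest [] := by
  intro pre
  induction pre with
  | nil => intro post piece _; simp [altGo]
  | cons p pre ih =>
      intro post piece hc
      simp only [List.mem_cons, not_or] at hc
      have hp : (p == c) = false := beq_false_of_ne (fun h => hc.1 h.symm)
      simp only [List.cons_append, altGo, hp, Bool.false_eq_true, if_false]
      rw [ih post (p :: piece) hc.2]
      simp

theorem Afold_shift (u post : List Char) :
    ∀ (js : List Int) (a : Int), 0 ≤ a → (∀ x ∈ js, 0 ≤ x) →
      Afold (u ++ post) (a + u.length) (js.map (fun num => num + u.length)) = Afold post a js := by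
  intro js
  induction js with
  | nil =>
      intro a ha _
      simp only [List.map_nil, Afold]
      rw [PySem.List.slice_from (u ++ post) (by omega), PySem.List.slice_from post ha]
      congr 1
      have h1 : (a + (u.length : Int)).toNat = u.length + a.toNat := by omega
      rw [h1, ← List.drop_drop, List.drop_left]
  | cons e js ih =>
      intro a ha hnn
      have he : 0 ≤ e := hnn e List.mem_cons_self
      simp only [List.map_cons, Afold]
      rw [PySem.List.slice_toNat (u ++ post) (by omega) (by omega),
          PySem.List.slice_toNat post ha he]
      have h1 : (a + (u.length : Int)).toNat = u.length + a.toNat := by omega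
      rw [h1]
      have h2 : (e + (u.length : Int)).toNat - (u.length + a.toNat) = e.toNat - a.toNat := by omega
      rw [h2, ← List.drop_drop, List.drop_left]
      have h3 : e + (u.length : Int) + 1 = (e + 1) + u.length := by ring
      rw [h3, ih (e + 1) (by omega) (fun x hx => hnn x (List.mem_cons_of_mem _ hx))]

theorem main_lemma : ∀ (sub s : List Char), sub.Sublist s →
    ∃ js : List Int, gsiA s sub = some js ∧ (∀ x ∈ js, 0 ≤ x) ∧
      Afold s 0 js = altGo s sub [] := by
  intro sub
  induction sub with
  | nil =>
      intro s _
      refine ⟨[], rfl, by simp, ?_⟩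
      simp only [Afold]
      rw [PySem.List.slice_from s le_rfl, altGo_nil_sub]
      simp
  | cons c rest ih =>
      intro s hsub
      have hc : c ∈ s := hsub.subset List.mem_cons_self
      obtain ⟨pre, post, rfl, hcpre⟩ := first_split hc
      have hrest : rest.Sublist post := sublist_after_first pre hsub hcpre
      obtain ⟨js, hjs, hnn, hAB⟩ := ih post hrest
      refine ⟨(0 + (pre.length : Int)) ::
        js.map (fun num => num + (0 + (pre.length : Int)) + 1), ?_, ?_, ?_⟩
      · show gsiScan c (fun t => gsiA t rest) (pre ++ c :: post) 0 = _
        rw [gsiScan_spec c _ pre post 0 hcpre, hjs]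
      · intro x hx
        simp only [List.mem_cons, List.mem_map] at hx
        rcases hx with h | ⟨y, hy, rfl⟩
        · omega
        · have := hnn y hy; omega
      · rw [altGo_split rest pre post [] hcpre]
        simp only [Afold, List.reverse_nil, List.nil_append]
        have hpiece : String.mk (PySem.List.slice (pre ++ c :: post)
            (some 0) (some (0 + (pre.length : Int)))) = String.mk pre := by
          rw [PySem.List.slice_toNat (pre ++ c :: post) le_rfl (by omega)]
          congr 1
          have : (0 + (pre.length : Int)).toNat - (0 : Int).toNat = pre.length := by omega
          rw [this]
          simp
        rw [hpiece]
        congr 1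
        have hmap : (js.map (fun num => num + (0 + (pre.length : Int)) + 1))
            = js.map (fun num => num + ((pre ++ [c]).length : Int)) := by
          apply List.map_congr_left
          intro x _
          simp
          ring
        have hstart : (0 + (pre.length : Int)) + 1 = (0 : Int) + ((pre ++ [c]).length : Int) := by
          simp
        have hlist : pre ++ c :: post = (pre ++ [c]) ++ post := by simp
        rw [hmap, hstart, hlist, Afold_shift (pre ++ [c]) post js 0 le_rfl hnn]
        exact hAB

-- ===== VERDICT (by name: the statement is the Claim_ definition above) =====
theorem get_insertions_spec : Claim_equal_get_insertions := by
  intro string sub _ hpre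
  unfold Spec_get_insertions get_insertions get_insertions_alt
  obtain ⟨js, hjs, _, hAB⟩ := main_lemma sub.toList string.toList hpre
  simp only [hjs]
  rw [foldl_to_Afold string.toList js [] 0]
  simpa using hAB
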